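-- pv_equiv track=rewrite | github.com/billHuangPY/LeetCode | OtherProblems/distancemetric.py | distanceMetrictwoway
-- ===== SOURCE A (Python) =====
-- def distanceMetrictwoway(arr):
--     arr_dist = [0 for i in arr]
--     for i in range(len(arr)):
--         for j in range(i + 1, len(arr)):
--             if arr[i] == arr[j]:
--                 dist = abs(i - j)
--                 arr_dist[i] += dist
--                 arr_dist[j] += dist
--
--     return arr_dist
-- ===== SOURCE B (Python) =====
-- def distanceMetrictwoway(arr):
--     # O(n): one-pass prefix scan per direction with (count, index-sum) per value.
--     def one_side(indexed):
--         cnt = {}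
--         sm = {}
--         out = []
--         for i, v in indexed:
--             c = cnt.get(v, 0)
--             t = sm.get(v, 0)
--             out.append(c * i - t)
--             cnt[v] = c + 1
--             sm[v] = t + i
--         return out
--
--     idx = list(enumerate(arr))
--     left = one_side(idx)
--     right = [-x for x in one_side(list(reversed(idx)))][::-1]
--     return [l + r for l, r in zip(left, right)]
-- ===== Notes on version B (the rewrite author's own statement) =====
-- stated objective: faster
-- what changed: Replaced the O(n^2) all-pairs double loop with two O(n) directional scans that keep a per-value running (count, index-sum) in dictionaries, so each index's distance sum is computed in O(1) from prefix statistics.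
import Mathlib
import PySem

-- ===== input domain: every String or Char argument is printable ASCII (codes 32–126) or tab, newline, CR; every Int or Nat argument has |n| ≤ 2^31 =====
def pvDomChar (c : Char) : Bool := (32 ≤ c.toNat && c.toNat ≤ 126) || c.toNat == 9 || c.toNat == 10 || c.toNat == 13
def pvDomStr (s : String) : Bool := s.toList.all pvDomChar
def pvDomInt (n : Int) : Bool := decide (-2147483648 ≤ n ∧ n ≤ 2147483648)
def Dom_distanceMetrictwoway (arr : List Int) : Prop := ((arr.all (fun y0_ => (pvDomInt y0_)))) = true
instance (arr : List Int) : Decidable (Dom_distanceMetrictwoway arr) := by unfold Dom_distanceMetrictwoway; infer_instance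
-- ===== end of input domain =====

-- B replaces A's O(n^2) all-pairs double loop by two O(n) directional scans that keep,
-- per value, a running (count, index-sum) in dictionaries (objective: faster, asymptotic).

-- ===== PORT A =====
-- literal port of A: nested loops i < j, on equal values add |i-j| to both cells
def distanceMetrictwoway (arr : List Int) : List Int :=
  let n := arr.length
  let init := arr.map (fun _ => (0 : Int))
  (List.range n).foldl
    (fun d i =>
      (List.range' (i + 1) (n - (i + 1))).foldl
        (fun d j =>
          if arr.getD i 0 = arr.getD j 0 then
            let dist : Int := |(i : Int) - (j : Int)|
            let d' := d.set i (d.getD i 0 + dist)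
            d'.set j (d'.getD j 0 + dist)
          else d)
        d)
    init

-- ===== PORT B =====
-- port of Source B's one_side: scan pairs (index, value), emit c*i - t, update per-value count/sum dicts
def pvOneSide : List (Int × Int) → PySem.Dict Int Int → PySem.Dict Int Int → List Int
  | [], _, _ => []
  | (i, v) :: rest, cnt, sm =>
      let c := cnt.getD v 0
      let t := sm.getD v 0
      (c * i - t) :: pvOneSide rest (cnt.insert v (c + 1)) (sm.insert v (t + i))

def distanceMetrictwoway_alt (arr : List Int) : List Int :=
  let idx := PySem.List.enumerate arr 0
  let left := pvOneSide idx PySem.Dict.empty PySem.Dict.empty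
  let right := ((pvOneSide idx.reverse PySem.Dict.empty PySem.Dict.empty).map (fun x => -x)).reverse
  List.zipWith (fun l r => l + r) left right

-- ===== PRECONDITION & SPEC =====
def Spec_distanceMetrictwoway (arr : List Int) (out : List Int) : Prop := out = distanceMetrictwoway_alt arr
instance (arr : List Int) (out : List Int) : Decidable (Spec_distanceMetrictwoway arr out) := by unfold Spec_distanceMetrictwoway; infer_instance

-- ===== CLAIM (what is proved, stated in full; the proofs are below) =====
def Claim_equal_distanceMetrictwoway : Prop := ∀ (arr : List Int), Dom_distanceMetrictwoway arr → Spec_distanceMetrictwoway arr (distanceMetrictwoway arr)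

-- ===== LEMMAS AND PROOFS =====

-- function-state version of pvOneSide (dicts replaced by their lookup functions)
def pvOneSideF : List (Int × Int) → (Int → Int) → (Int → Int) → List Int
  | [], _, _ => []
  | (i, v) :: rest, C, T =>
      (C v * i - T v) :: pvOneSideF rest
        (fun w => if w = v then C v + 1 else C w)
        (fun w => if w = v then T v + i else T w)

def pvCnt (l : List (Int × Int)) (v : Int) : Int := ((l.filter (fun p => p.2 == v)).length : Int)
def pvSum (l : List (Int × Int)) (v : Int) : Int := ((l.filter (fun p => p.2 == v)).map Prod.fst).sum

lemma pvOneSide_eq_F : ∀ (l : List (Int × Int)) (cnt sm : PySem.Dict Int Int),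
    pvOneSide l cnt sm = pvOneSideF l (fun v => cnt.getD v 0) (fun v => sm.getD v 0) := by
  intro l
  induction l with
  | nil => intro cnt sm; rfl
  | cons p rest ih =>
    intro cnt sm
    obtain ⟨i, v⟩ := p
    simp only [pvOneSide, pvOneSideF]
    rw [ih]
    have hc : (fun w => (cnt.insert v (cnt.getD v 0 + 1)).getD w 0)
        = (fun w => if w = v then cnt.getD v 0 + 1 else cnt.getD w 0) := by
      funext w; rw [PySem.Dict.getD_insert]
    have hs : (fun w => (sm.insert v (sm.getD v 0 + i)).getD w 0)
        = (fun w => if w = v then sm.getD v 0 + i else sm.getD w 0) := by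
      funext w; rw [PySem.Dict.getD_insert]
    rw [hc, hs]

lemma length_pvOneSideF : ∀ (l : List (Int × Int)) C T, (pvOneSideF l C T).length = l.length := by
  intro l
  induction l with
  | nil => intro C T; rfl
  | cons p rest ih =>
    intro C T
    obtain ⟨i, v⟩ := p
    simp only [pvOneSideF, List.length_cons, ih]

lemma getElem_pvOneSideF : ∀ (l : List (Int × Int)) C T (m : Nat) (h : m < (pvOneSideF l C T).length),
    (pvOneSideF l C T)[m] =
      (C (l.getD m (0,0)).2 + pvCnt (l.take m) (l.getD m (0,0)).2) * (l.getD m (0,0)).1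
        - (T (l.getD m (0,0)).2 + pvSum (l.take m) (l.getD m (0,0)).2) := by
  intro l
  induction l with
  | nil => intro C T m h; simp [pvOneSideF] at h
  | cons p rest ih =>
    intro C T m h
    obtain ⟨i, v⟩ := p
    match m with
    | 0 => simp [pvOneSideF, pvCnt, pvSum]
    | Nat.succ m' =>
      have h' : m' < (pvOneSideF rest
          (fun w => if w = v then C v + 1 else C w)
          (fun w => if w = v then T v + i else T w)).length := by
        simp only [pvOneSideF] at h ⊢
        simpa using Nat.lt_of_succ_lt_succ h
      have := ih (fun w => if w = v then C v + 1 else C w)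
          (fun w => if w = v then T v + i else T w) m' h'
      simp only [pvOneSideF, List.getElem_cons_succ, List.getD_cons_succ, List.take_succ_cons]
      rw [this]
      generalize rest.getD m' (0, 0) = q
      obtain ⟨x, w⟩ := q
      by_cases hw : w = v
      · subst hw
        have h1 : pvCnt ((i, w) :: rest.take m') w = pvCnt (rest.take m') w + 1 := by
          simp [pvCnt]
        have h2 : pvSum ((i, w) :: rest.take m') w = pvSum (rest.take m') w + i := by
          simp [pvSum]
          ring
        rw [if_pos rfl, if_pos rfl, h1, h2]
        ring
      · have hvw : (v == w) = false := by simp [Ne.symm hw]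
        have h1 : pvCnt ((i, v) :: rest.take m') w = pvCnt (rest.take m') w := by
          simp [pvCnt, hvw]
        have h2 : pvSum ((i, v) :: rest.take m') w = pvSum (rest.take m') w := by
          simp [pvSum, hvw]
        rw [if_neg hw, if_neg hw, h1, h2]

lemma pvCnt_mul_sub (l : List (Int × Int)) (v i : Int) :
    pvCnt l v * i - pvSum l v = (l.map (fun p => if p.2 = v then i - p.1 else 0)).sum := by
  induction l with
  | nil => simp [pvCnt, pvSum]
  | cons p rest ih =>
    by_cases hw : p.2 = v
    · have h1 : pvCnt (p :: rest) v = pvCnt rest v + 1 := by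
        simp [pvCnt, hw]
      have h2 : pvSum (p :: rest) v = pvSum rest v + p.1 := by
        simp [pvSum, hw]
        ring
      simp only [List.map_cons, List.sum_cons, h1, h2, if_pos hw]
      linarith [ih]
    · have h1 : pvCnt (p :: rest) v = pvCnt rest v := by
        simp [pvCnt, hw]
      have h2 : pvSum (p :: rest) v = pvSum rest v := by
        simp [pvSum, hw]
      simp only [List.map_cons, List.sum_cons, h1, h2, if_neg hw]
      linarith [ih]

-- ===== A-side characterization =====

lemma inner_length (arr : List Int) (i : Nat) : ∀ (js : List Nat) (d : List Int),
    (js.foldl (fun d j =>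
        if arr.getD i 0 = arr.getD j 0 then
          let dist : Int := |(i : Int) - (j : Int)|
          let d' := d.set i (d.getD i 0 + dist)
          d'.set j (d'.getD j 0 + dist)
        else d) d).length = d.length := by
  intro js
  induction js with
  | nil => intro d; rfl
  | cons j rest ih =>
    intro d
    simp only [List.foldl_cons]
    rw [ih]
    split_ifs <;> simp

lemma inner_getD (arr : List Int) (i : Nat) (hin : i < arr.length) : ∀ (c s : Nat) (d : List Int), i < s → d.length = arr.length →
    ∀ (m : Nat), m < arr.length →
    ((List.range' s c).foldl (fun d j =>
        if arr.getD i 0 = arr.getD j 0 then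
          let dist : Int := |(i : Int) - (j : Int)|
          let d' := d.set i (d.getD i 0 + dist)
          d'.set j (d'.getD j 0 + dist)
        else d) d).getD m 0
      = d.getD m 0 +
        (if m = i then ((List.range' s c).map (fun j => if arr.getD i 0 = arr.getD j 0 then (j : Int) - i else 0)).sum
         else if m ∈ List.range' s c ∧ arr.getD i 0 = arr.getD m 0 then (m : Int) - i else 0) := by
  intro c
  induction c with
  | zero => intro s d his hd m hm; simp
  | succ c ih =>
    intro s d his hd m hm
    rw [List.range'_succ]
    simp only [List.foldl_cons, List.map_cons, List.sum_cons]
    have hdist : |(i : Int) - (s : Int)| = (s : Int) - (i : Int) := by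
      rw [abs_sub_comm]
      exact abs_of_nonneg (by omega)
    by_cases hcond : arr.getD i 0 = arr.getD s 0
    · rw [if_pos hcond]
      set dst : Int := |(i : Int) - (s : Int)| with hdst
      set d' := d.set i (d.getD i 0 + dst) with hd'
      set d1 := d'.set s (d'.getD s 0 + dst) with hd1
      have hlen' : d'.length = arr.length := by rw [hd', List.length_set, hd]
      have hlen1 : d1.length = arr.length := by rw [hd1, List.length_set, hlen']
      have hgd : ∀ m', m' < arr.length →
          d1.getD m' 0 = d.getD m' 0 +
            (if m' = i then (s : Int) - i else if m' = s then (s : Int) - i else 0) := by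
        intro m' hm'
        have hne : i ≠ s := Nat.ne_of_lt his
        rw [hd1, hd']
        by_cases hms : m' = s
        · subst hms
          simp only [List.getD_eq_getElem?_getD, List.getElem?_set, List.length_set]
          simp [hne, Ne.symm hne, (by omega : m' < d.length), hdist]
        · by_cases hmi : m' = i
          · subst hmi
            simp only [List.getD_eq_getElem?_getD, List.getElem?_set, List.length_set]
            simp [Ne.symm hms, (by omega : m' < d.length), hdist]
          · simp only [List.getD_eq_getElem?_getD, List.getElem?_set, List.length_set]
            simp [Ne.symm hms, Ne.symm hmi, hms, hmi]
      rw [ih (s + 1) d1 (by omega) hlen1 m hm, hgd m hm]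
      by_cases hmi : m = i
      · subst hmi
        rw [if_pos rfl, if_pos rfl, if_pos rfl, if_pos hcond]
        ring
      · rw [if_neg hmi, if_neg hmi, if_neg hmi]
        by_cases hms : m = s
        · subst hms
          rw [if_pos rfl]
          have hnotmem : ¬ (m ∈ List.range' (m + 1) c ∧ arr.getD i 0 = arr.getD m 0) := by
            rintro ⟨hmem, -⟩
            rw [List.mem_range'_1] at hmem
            omega
          rw [if_neg hnotmem, if_pos ⟨by simp, hcond⟩]
          ring
        · rw [if_neg hms]
          have hiff : (m ∈ List.range' (s + 1) c ∧ arr.getD i 0 = arr.getD m 0) ↔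
              (m ∈ s :: List.range' (s + 1) c ∧ arr.getD i 0 = arr.getD m 0) := by
            simp [List.mem_cons, hms]
          by_cases hmem : m ∈ List.range' (s + 1) c ∧ arr.getD i 0 = arr.getD m 0
          · rw [if_pos hmem, if_pos (hiff.mp hmem)]
            ring
          · rw [if_neg hmem, if_neg (fun h => hmem (hiff.mpr h))]
            ring
    · rw [if_neg hcond]
      rw [ih (s + 1) d (by omega) hd m hm]
      by_cases hmi : m = i
      · subst hmi
        rw [if_pos rfl, if_pos rfl, if_neg hcond]
        ring
      · rw [if_neg hmi, if_neg hmi]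
        by_cases hms : m = s
        · subst hms
          have h1 : ¬ (m ∈ List.range' (m + 1) c ∧ arr.getD i 0 = arr.getD m 0) := by
            rintro ⟨hmem, -⟩
            rw [List.mem_range'_1] at hmem
            omega
          have h2 : ¬ (m ∈ m :: List.range' (m + 1) c ∧ arr.getD i 0 = arr.getD m 0) := by
            rintro ⟨-, h⟩; exact hcond h
          rw [if_neg h1, if_neg h2]
        · have hiff : (m ∈ List.range' (s + 1) c ∧ arr.getD i 0 = arr.getD m 0) ↔
              (m ∈ s :: List.range' (s + 1) c ∧ arr.getD i 0 = arr.getD m 0) := by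
            simp [List.mem_cons, hms]
          by_cases hmem : m ∈ List.range' (s + 1) c ∧ arr.getD i 0 = arr.getD m 0
          · rw [if_pos hmem, if_pos (hiff.mp hmem)]
          · rw [if_neg hmem, if_neg (fun h => hmem (hiff.mpr h))]

def pvR (arr : List Int) (m : Nat) : Int :=
  ((List.range' (m + 1) (arr.length - (m + 1))).map
    (fun j => if arr.getD m 0 = arr.getD j 0 then (j : Int) - m else 0)).sum

def pvL (arr : List Int) (k m : Nat) : Int :=
  ((List.range k).map (fun j => if arr.getD j 0 = arr.getD m 0 then (m : Int) - j else 0)).sum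

lemma outer_length (arr : List Int) : ∀ (ks : List Nat) (d : List Int), d.length = arr.length →
    ((ks.foldl (fun d i =>
        (List.range' (i + 1) (arr.length - (i + 1))).foldl
          (fun d j =>
            if arr.getD i 0 = arr.getD j 0 then
              let dist : Int := |(i : Int) - (j : Int)|
              let d' := d.set i (d.getD i 0 + dist)
              d'.set j (d'.getD j 0 + dist)
            else d) d) d).length) = arr.length := by
  intro ks
  induction ks with
  | nil => intro d hd; exact hd
  | cons k rest ih =>
    intro d hd
    simp only [List.foldl_cons]
    exact ih _ (by rw [inner_length]; exact hd)

lemma outer_getD (arr : List Int) : ∀ (k : Nat), k ≤ arr.length →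
    ∀ (m : Nat), m < arr.length →
    ((List.range k).foldl (fun d i =>
        (List.range' (i + 1) (arr.length - (i + 1))).foldl
          (fun d j =>
            if arr.getD i 0 = arr.getD j 0 then
              let dist : Int := |(i : Int) - (j : Int)|
              let d' := d.set i (d.getD i 0 + dist)
              d'.set j (d'.getD j 0 + dist)
            else d) d)
        (arr.map (fun _ => (0 : Int)))).getD m 0
      = (if m < k then pvR arr m else 0) + pvL arr (min k m) m := by
  intro k
  induction k with
  | zero =>
    intro _ m hm
    simp [pvL, List.getD_eq_getElem?_getD]
  | succ k ihk =>
    intro hk1 m hm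
    have hk : k < arr.length := by omega
    rw [List.range_succ, List.foldl_append, List.foldl_cons, List.foldl_nil]
    have hprev : ((List.range k).foldl (fun d i =>
        (List.range' (i + 1) (arr.length - (i + 1))).foldl
          (fun d j =>
            if arr.getD i 0 = arr.getD j 0 then
              let dist : Int := |(i : Int) - (j : Int)|
              let d' := d.set i (d.getD i 0 + dist)
              d'.set j (d'.getD j 0 + dist)
            else d) d)
        (arr.map (fun _ => (0 : Int)))).length = arr.length :=
      outer_length arr (List.range k) _ (by simp)
    rw [inner_getD arr k hk (arr.length - (k + 1)) (k + 1) _ (by omega) hprev m hm]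
    rw [ihk (by omega) m hm]
    by_cases hmk : m = k
    · subst hmk
      rw [if_pos rfl, if_neg (lt_irrefl m), if_pos (Nat.lt_succ_self m)]
      have h1 : min m m = m := by omega
      have h2 : min (m + 1) m = m := by omega
      rw [h1, h2]
      show 0 + pvL arr m m + pvR arr m = pvR arr m + pvL arr m m
      ring
    · rw [if_neg hmk]
      by_cases hlt : m < k
      · have h1 : min k m = m := by omega
        have h2 : min (k + 1) m = m := by omega
        rw [if_pos hlt, if_pos (by omega : m < k + 1), h1, h2,
          if_neg (by rintro ⟨hmem, -⟩; rw [List.mem_range'_1] at hmem; omega)]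
        ring
      · have hgt : k < m := by omega
        have h1 : min k m = k := by omega
        have h2 : min (k + 1) m = k + 1 := by omega
        rw [if_neg hlt, if_neg (by omega : ¬ m < k + 1), h1, h2]
        have hmem : m ∈ List.range' (k + 1) (arr.length - (k + 1)) := by
          rw [List.mem_range'_1]; omega
        have hL : pvL arr (k + 1) m = pvL arr k m +
            (if arr.getD k 0 = arr.getD m 0 then (m : Int) - k else 0) := by
          unfold pvL
          rw [List.range_succ, List.map_append, List.sum_append]
          simp
        rw [hL]
        by_cases hc : arr.getD k 0 = arr.getD m 0
        · rw [if_pos ⟨hmem, hc⟩, if_pos hc]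
          ring
        · rw [if_neg (by rintro ⟨-, h⟩; exact hc h), if_neg hc]
          ring

lemma length_A (arr : List Int) : (distanceMetrictwoway arr).length = arr.length := by
  exact outer_length arr (List.range arr.length) _ (by simp)

-- ===== B-side characterization =====

lemma A_getElem (arr : List Int) (m : Nat) (h : m < (distanceMetrictwoway arr).length) :
    (distanceMetrictwoway arr)[m] = pvR arr m + pvL arr m m := by
  have hA : distanceMetrictwoway arr = (List.range arr.length).foldl (fun d i =>
      (List.range' (i + 1) (arr.length - (i + 1))).foldl
        (fun d j =>
          if arr.getD i 0 = arr.getD j 0 then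
            let dist : Int := |(i : Int) - (j : Int)|
            let d' := d.set i (d.getD i 0 + dist)
            d'.set j (d'.getD j 0 + dist)
          else d) d)
      (arr.map (fun _ => (0 : Int))) := rfl
  have hm : m < arr.length := by rw [← length_A arr]; exact h
  have hout := outer_getD arr arr.length le_rfl m hm
  rw [if_pos hm, (by omega : min arr.length m = m)] at hout
  calc (distanceMetrictwoway arr)[m]
      = (distanceMetrictwoway arr).getD m 0 := (List.getD_eq_getElem _ _ h).symm
    _ = pvR arr m + pvL arr m m := by rw [hA]; exact hout


lemma enumerate_idx (arr : List Int) :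
    PySem.List.enumerate arr 0 = (List.range arr.length).map (fun (j : Nat) => ((j : Int), arr.getD j 0)) := by
  apply List.ext_getElem
  · simp [PySem.List.length_enumerate]
  · intro j h1 h2
    rw [PySem.List.getElem_enumerate]
    have hj : j < arr.length := by simpa [PySem.List.length_enumerate] using h1
    simp [List.getElem?_eq_getElem hj]

lemma drop_range_map (arr : List Int) (m : Nat) :
    ((List.range arr.length).map (fun (j : Nat) => ((j : Int), arr.getD j 0))).drop (m + 1)
      = (List.range' (m + 1) (arr.length - (m + 1))).map (fun (j : Nat) => ((j : Int), arr.getD j 0)) := by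
  rw [← List.map_drop]
  congr 1
  apply List.ext_getElem
  · simp
  · intro j h1 h2
    rw [List.getElem_drop, List.getElem_range, List.getElem_range']
    omega

lemma pvCnt_reverse (l : List (Int × Int)) (v : Int) : pvCnt l.reverse v = pvCnt l v := by
  simp [pvCnt, List.filter_reverse]

lemma pvSum_reverse (l : List (Int × Int)) (v : Int) : pvSum l.reverse v = pvSum l v := by
  simp [pvSum, List.filter_reverse]

lemma pv_neg_sum : ∀ (l : List Int), -(l.sum) = (l.map (fun x => -x)).sum := by
  intro l
  induction l with
  | nil => simp
  | cons x xs ih => simp only [List.sum_cons, List.map_cons, neg_add, ih]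

lemma pvR_eq (arr : List Int) (m : Nat) :
    ((List.range' (m + 1) (arr.length - (m + 1))).map
      (fun (j : Nat) => -(if arr.getD j 0 = arr.getD m 0 then ((m : Int) - j) else 0))).sum
      = pvR arr m := by
  unfold pvR
  congr 1
  apply List.map_congr_left
  intro j hj
  by_cases hc : arr.getD m 0 = arr.getD j 0
  · rw [if_pos hc.symm, if_pos hc]; ring
  · rw [if_neg (fun hh => hc hh.symm), if_neg hc]; ring

lemma length_left (arr : List Int) :
    (pvOneSide (PySem.List.enumerate arr 0) PySem.Dict.empty PySem.Dict.empty).length = arr.length := by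
  rw [pvOneSide_eq_F, length_pvOneSideF, PySem.List.length_enumerate]

lemma length_raw (arr : List Int) :
    (pvOneSide (PySem.List.enumerate arr 0).reverse PySem.Dict.empty PySem.Dict.empty).length = arr.length := by
  rw [pvOneSide_eq_F, length_pvOneSideF, List.length_reverse, PySem.List.length_enumerate]

lemma length_B (arr : List Int) : (distanceMetrictwoway_alt arr).length = arr.length := by
  show (List.zipWith (fun l r => l + r)
      (pvOneSide (PySem.List.enumerate arr 0) PySem.Dict.empty PySem.Dict.empty)
      (((pvOneSide (PySem.List.enumerate arr 0).reverse PySem.Dict.empty PySem.Dict.empty).map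
        (fun x => -x)).reverse)).length = arr.length
  rw [List.length_zipWith, List.length_reverse, List.length_map, length_left, length_raw]
  omega

lemma B_getElem (arr : List Int) (m : Nat) (h : m < (distanceMetrictwoway_alt arr).length) :
    (distanceMetrictwoway_alt arr)[m] = pvL arr m m + pvR arr m := by
  have hm : m < arr.length := by rw [← length_B arr]; exact h
  have hB : distanceMetrictwoway_alt arr = List.zipWith (fun l r => l + r)
      (pvOneSide (PySem.List.enumerate arr 0) PySem.Dict.empty PySem.Dict.empty)
      (((pvOneSide (PySem.List.enumerate arr 0).reverse PySem.Dict.empty PySem.Dict.empty).map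
        (fun x => -x)).reverse) := rfl
  have hL : ∀ (hL1 : m < (pvOneSide (PySem.List.enumerate arr 0) PySem.Dict.empty PySem.Dict.empty).length),
      (pvOneSide (PySem.List.enumerate arr 0) PySem.Dict.empty PySem.Dict.empty)[m] = pvL arr m m := by
    intro hL1
    have hL2 : m < (pvOneSideF (PySem.List.enumerate arr 0)
        (fun v => PySem.Dict.empty.getD v 0) (fun v => PySem.Dict.empty.getD v 0)).length := by
      rw [length_pvOneSideF, PySem.List.length_enumerate]; exact hm
    have := getElem_pvOneSideF (PySem.List.enumerate arr 0)
        (fun v => PySem.Dict.empty.getD v 0) (fun v => PySem.Dict.empty.getD v 0) m hL2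
    have hgd : (PySem.List.enumerate arr 0).getD m (0, 0) = ((m : Int), arr.getD m 0) := by
      rw [enumerate_idx, List.getD_eq_getElem _ _ (by simpa using hm), List.getElem_map,
        List.getElem_range]
    have htake : (PySem.List.enumerate arr 0).take m
        = (List.range m).map (fun (j : Nat) => ((j : Int), arr.getD j 0)) := by
      rw [enumerate_idx, ← List.map_take, List.take_range, Nat.min_eq_left (Nat.le_of_lt hm)]
    simp only [pvOneSide_eq_F]
    rw [this, hgd, htake]
    simp only [PySem.Dict.getD_empty, zero_add]
    rw [pvCnt_mul_sub, List.map_map]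
    rfl
  have hR : ∀ (hR1 : m < (((pvOneSide (PySem.List.enumerate arr 0).reverse PySem.Dict.empty
        PySem.Dict.empty).map (fun x => -x)).reverse).length),
      (((pvOneSide (PySem.List.enumerate arr 0).reverse PySem.Dict.empty PySem.Dict.empty).map
        (fun x => -x)).reverse)[m] = pvR arr m := by
    intro hR1
    rw [List.getElem_reverse, List.getElem_map]
    simp only [List.length_map, length_raw]
    have hplt : arr.length - 1 - m < (pvOneSideF (PySem.List.enumerate arr 0).reverse
        (fun v => PySem.Dict.empty.getD v 0) (fun v => PySem.Dict.empty.getD v 0)).length := by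
      rw [length_pvOneSideF, List.length_reverse, PySem.List.length_enumerate]; omega
    simp only [pvOneSide_eq_F]
    rw [getElem_pvOneSideF _ _ _ _ hplt]
    have hgd : ((PySem.List.enumerate arr 0).reverse).getD (arr.length - 1 - m) (0, 0)
        = ((m : Int), arr.getD m 0) := by
      rw [List.getD_eq_getElem _ _ (by rw [List.length_reverse, PySem.List.length_enumerate]; omega),
        List.getElem_reverse]
      simp only [PySem.List.length_enumerate]
      have harith : arr.length - 1 - (arr.length - 1 - m) = m := by omega
      simp only [harith]
      rw [PySem.List.getElem_enumerate]
      simp [List.getElem?_eq_getElem hm]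
    have htake : ((PySem.List.enumerate arr 0).reverse).take (arr.length - 1 - m)
        = (((List.range arr.length).map (fun (j : Nat) => ((j : Int), arr.getD j 0))).drop (m + 1)).reverse := by
      rw [enumerate_idx, List.take_reverse]
      congr 2
      rw [List.length_map, List.length_range]
      omega
    rw [hgd, htake, drop_range_map]
    simp only [PySem.Dict.getD_empty, zero_add]
    rw [pvCnt_reverse, pvSum_reverse, neg_sub]
    have hms := pvCnt_mul_sub ((List.range' (m + 1) (arr.length - (m + 1))).map
      (fun (j : Nat) => ((j : Int), arr.getD j 0))) (arr.getD m 0) (m : Int)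
    have hneg : pvSum ((List.range' (m + 1) (arr.length - (m + 1))).map
        (fun (j : Nat) => ((j : Int), arr.getD j 0))) (arr.getD m 0)
        - pvCnt ((List.range' (m + 1) (arr.length - (m + 1))).map
        (fun (j : Nat) => ((j : Int), arr.getD j 0))) (arr.getD m 0) * (m : Int)
        = -((((List.range' (m + 1) (arr.length - (m + 1))).map
        (fun (j : Nat) => ((j : Int), arr.getD j 0))).map
        (fun p => if p.2 = arr.getD m 0 then (m : Int) - p.1 else 0)).sum) := by
      rw [← hms]; ring
    rw [hneg, pv_neg_sum, List.map_map, List.map_map]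
    exact pvR_eq arr m
  rw [List.getElem_of_eq hB, List.getElem_zipWith, hL _, hR _]

-- ===== VERDICT (by name: the statement is the Claim_ definition above) =====
theorem distanceMetrictwoway_spec : Claim_equal_distanceMetrictwoway := by
  intro arr _
  unfold Spec_distanceMetrictwoway
  apply List.ext_getElem
  · rw [length_A, length_B]
  · intro m h1 h2
    rw [A_getElem arr m h1, B_getElem arr m h2, add_comm]
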